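-- pv_equiv track=rewrite | github.com/monarch-initiative/gpsea | src/gpsea/view/_protein_visualizer.py | assign_colors
-- ===== SOURCE A (Python) =====
-- import typing
--
-- def assign_colors(names: typing.Iterable[str], available_colors: typing.Sequence[str]):
--     num_colors = 0
--     _colors = dict()
--     seen = set()
--     for n in names:
--         if n in seen:
--             continue
--         seen.add(n)
--         color = available_colors[num_colors]
--         _colors[n] = color
--         num_colors += 1
--
--     return _colors
-- ===== SOURCE B (Python) =====
-- import typing
--
-- def assign_colors(names: typing.Iterable[str], available_colors: typing.Sequence[str]):
--     # Reverse-pass + sort: walk the names backwards, overwriting first[n] = i,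
--     # so each name ends up mapped to its FIRST index; then sort the names by
--     # that index and pair them with the colors positionally.  No seen-set, no
--     # membership test, no skip branch.
--     names = list(names)
--     first = {}
--     for i, n in reversed(list(enumerate(names))):
--         first[n] = i
--     order = sorted(first, key=first.get)
--     return {n: available_colors[i] for i, n in enumerate(order)}
-- ===== Notes on version B (the rewrite author's own statement) =====
-- stated objective: alternative
-- what changed: Replaces A's single forward pass with a seen-set, counter and skip branch by a reverse-pass-then-sort pipeline: a backwards walk overwrites first[n]=i so each name maps to its first index, the names are sorted by that index, and colors are attached positionally; no seen-set or membership test remains.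
import Mathlib
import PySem

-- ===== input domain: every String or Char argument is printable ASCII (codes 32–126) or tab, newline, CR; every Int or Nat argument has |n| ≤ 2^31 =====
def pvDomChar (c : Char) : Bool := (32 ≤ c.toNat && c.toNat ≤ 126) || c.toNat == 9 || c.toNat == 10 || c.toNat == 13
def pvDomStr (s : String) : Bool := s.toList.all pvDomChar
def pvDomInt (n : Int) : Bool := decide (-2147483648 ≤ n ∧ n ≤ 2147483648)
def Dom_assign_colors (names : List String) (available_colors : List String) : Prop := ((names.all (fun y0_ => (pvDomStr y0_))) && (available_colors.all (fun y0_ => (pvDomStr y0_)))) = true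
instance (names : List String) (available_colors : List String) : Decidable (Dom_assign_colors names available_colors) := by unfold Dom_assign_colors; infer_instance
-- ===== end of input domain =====

-- B replaces A's seen-set single pass by a reverse-pass first-index dict plus a sort by that index; alternative decomposition, not faster.


-- ===== PORT A =====
-- loop body of A: state = (num_colors, _colors, seen); available_colors[num_colors] as pyGetD (total under Pre_)
def assignStep (available_colors : List String)
    (st : Int × PySem.Dict String String × PySem.Set String) (n : String) :
    Int × PySem.Dict String String × PySem.Set String :=
  if PySem.Set.contains st.2.2 n then st
  else
    let color := PySem.List.pyGetD available_colors st.1 ""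
    (st.1 + 1, st.2.1.insert n color, PySem.Set.add st.2.2 n)

def assign_colors (names : List String) (available_colors : List String) : List (String × String) :=
  (names.foldl (assignStep available_colors)
    ((0 : Int), (PySem.Dict.empty : PySem.Dict String String), (PySem.Set.empty : PySem.Set String))).2.1.items

-- ===== PORT B =====
-- first[n] = i over reversed(list(enumerate(names))): last write wins, so each name maps to its first index
def assign_colors_alt (names : List String) (available_colors : List String) : List (String × String) :=
  let first : PySem.Dict String Int :=
    (PySem.List.enumerate names 0).reverse.foldl
      (fun d p => d.insert p.2 p.1) PySem.Dict.empty
  -- sorted(first, key=first.get): every key is present, so first.get = getD with any default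
  let order : List String := PySem.List.sorted first.keys (fun n => first.getD n 0) false
  -- {n: available_colors[i] for i, n in enumerate(order)}
  ((PySem.List.enumerate order 0).foldl
      (fun d p => d.insert p.2 (PySem.List.pyGetD available_colors p.1 "")) PySem.Dict.empty).items

-- ===== PRECONDITION & SPEC =====
-- A raises IndexError when the number of distinct names exceeds the number of available colors; exactly those inputs are excluded.
def Pre_assign_colors (names : List String) (available_colors : List String) : Prop :=
  (PySem.List.dedup names).length ≤ available_colors.length
instance (names : List String) (available_colors : List String) : Decidable (Pre_assign_colors names available_colors) := by unfold Pre_assign_colors; infer_instance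
def pvWitness_assign_colors : List String × List String := (["a", "b", "a"], ["red", "green", "blue"])

def Spec_assign_colors (names : List String) (available_colors : List String) (out : List (String × String)) : Prop := out = assign_colors_alt names available_colors
instance (names : List String) (available_colors : List String) (out : List (String × String)) : Decidable (Spec_assign_colors names available_colors out) := by unfold Spec_assign_colors; infer_instance

-- ===== CLAIM (what is proved, stated in full; the proofs are below) =====
def Claim_equal_assign_colors : Prop := ∀ (names : List String) (available_colors : List String), Dom_assign_colors names available_colors → Pre_assign_colors names available_colors → Spec_assign_colors names available_colors (assign_colors names available_colors)

-- ===== LEMMAS AND PROOFS =====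

-- the common characterisation: the table of (k-th unique name, k-th color)
def colorTbl (available_colors : List String) (u : List String) : List (String × String) :=
  (PySem.List.enumerate u 0).map (fun p => (p.2, PySem.List.pyGetD available_colors p.1 ""))

lemma colorTbl_append_singleton (avail : List String) (u : List String) (n : String) :
    colorTbl avail (u ++ [n]) = colorTbl avail u ++ [(n, PySem.List.pyGetD avail (u.length : Int) "")] := by
  simp [colorTbl, PySem.List.enumerate_append, PySem.List.enumerate_cons, PySem.List.enumerate_nil]

lemma keys_of_items_tbl (avail : List String) (u : List String) (d : PySem.Dict String String)
    (h : d.items = colorTbl avail u) : d.keys = u := by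
  have : d.keys = d.items.map (·.1) := rfl
  rw [this, h, colorTbl, List.map_map]
  simp only [Function.comp_def]
  exact PySem.List.map_snd_enumerate u 0

-- A's loop computes colorTbl of the ordered unique names
lemma loop_eq (avail : List String) :
    ∀ (names u : List String) (d : PySem.Dict String String),
      d.items = colorTbl avail u →
      ((names.foldl (assignStep avail) ((u.length : Int), d, (u : PySem.Set String)))).2.1.items
        = colorTbl avail (PySem.Set.update u names) := by
  intro names
  induction names with
  | nil =>
      intro u d h
      simpa [PySem.Set.update] using h
  | cons n rest ih =>
      intro u d h
      rw [List.foldl_cons]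
      by_cases hn : n ∈ u
      · have hstep : assignStep avail ((u.length : Int), d, (u : PySem.Set String)) n
            = ((u.length : Int), d, (u : PySem.Set String)) := by
          simp [assignStep, hn]
        rw [hstep, ih u d h, PySem.Set.update_cons, PySem.Set.add_of_mem hn]
      · have hcont : d.contains n = false := by
          have hk := keys_of_items_tbl avail u d h
          have : ¬ d.contains n = true := by
            rw [PySem.Dict.contains_iff_mem_keys, hk]; exact hn
          simpa using this
        have hstep : assignStep avail ((u.length : Int), d, (u : PySem.Set String)) n
            = (((u ++ [n]).length : Int),
               d.insert n (PySem.List.pyGetD avail (u.length : Int) ""),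
               ((u ++ [n] : List String) : PySem.Set String)) := by
          simp [assignStep, hn]
        rw [hstep, ih (u ++ [n]) _ ?_, PySem.Set.update_cons, PySem.Set.add_of_not_mem hn]
        rw [PySem.Dict.items_insert_of_not_contains _ _ hcont, h,
            colorTbl_append_singleton]

-- ===== B-side: the first-index dict =====
def firstD (xs : List String) (k : Int) : PySem.Dict String Int :=
  (PySem.List.enumerate xs k).reverse.foldl (fun d p => d.insert p.2 p.1) PySem.Dict.empty

lemma firstD_cons (x : String) (xs : List String) (k : Int) :
    firstD (x :: xs) k = (firstD xs (k + 1)).insert x k := by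
  unfold firstD
  rw [PySem.List.enumerate_cons, List.reverse_cons, List.foldl_append]
  rfl

lemma firstD_get? (n : String) :
    ∀ (xs : List String) (k : Int),
      (firstD xs k).get? n = if n ∈ xs then some (k + (xs.idxOf n : Int)) else none := by
  intro xs
  induction xs with
  | nil => intro k; simp [firstD, PySem.List.enumerate_nil, PySem.Dict.get?_empty]
  | cons x rest ih =>
      intro k
      rw [firstD_cons, PySem.Dict.get?_insert, ih (k + 1)]
      by_cases hx : n = x
      · subst hx; simp [List.idxOf_cons_self]
      · by_cases hm : n ∈ rest
        · simp only [if_neg hx, if_pos hm, List.mem_cons, hx, false_or, hm, if_pos]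
          rw [List.idxOf_cons_ne _ (by simpa using Ne.symm hx)]
          congr 1
          push_cast
          ring
        · simp [hx, hm]

lemma firstD_mem_keys (n : String) :
    ∀ (xs : List String) (k : Int), n ∈ (firstD xs k).keys ↔ n ∈ xs := by
  intro xs
  induction xs with
  | nil => intro k; simp [firstD, PySem.List.enumerate_nil, PySem.Dict.keys_empty]
  | cons x rest ih =>
      intro k
      rw [firstD_cons, PySem.Dict.mem_keys_insert, ih (k + 1)]
      simp [eq_comm]

lemma firstD_nodup_keys : ∀ (xs : List String) (k : Int), (firstD xs k).keys.Nodup := by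
  intro xs
  induction xs with
  | nil => intro k; simp [firstD, PySem.List.enumerate_nil, PySem.Dict.keys_empty]
  | cons x rest ih =>
      intro k
      rw [firstD_cons]
      exact PySem.Dict.nodup_keys_insert _ _ _ (ih (k + 1))

lemma firstD_getD (names : List String) (n : String) (hn : n ∈ names) :
    (firstD names 0).getD n 0 = (names.idxOf n : Int) := by
  have h := firstD_get? n names 0
  rw [if_pos hn] at h
  rw [PySem.Dict.getD_eq_get?_getD, h]
  simp

-- ===== B-side: dedup is the strictly-first-index order =====
-- dedup skips elements already in the accumulator
lemma foldl_add_filter (x : String) :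
    ∀ (l : List String) (s : PySem.Set String), x ∈ s →
      l.foldl PySem.Set.add s = (l.filter (fun m => !(m == x))).foldl PySem.Set.add s := by
  intro l
  induction l with
  | nil => intro s _; rfl
  | cons m rest ih =>
      intro s hs
      by_cases hm : m = x
      · subst hm
        simp [PySem.Set.add_of_mem hs, ih s hs]
      · have hx : x ∈ PySem.Set.add s m := (PySem.Set.mem_add s m x).2 (Or.inl hs)
        simp [hm, ih (PySem.Set.add s m) hx]

lemma foldl_add_cons_out (x : String) :
    ∀ (l : List String) (s : List String), (∀ m ∈ l, m ≠ x) →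
      l.foldl PySem.Set.add (x :: s) = x :: l.foldl PySem.Set.add s := by
  intro l
  induction l with
  | nil => intro s _; rfl
  | cons m rest ih =>
      intro s hl
      have hmx : m ≠ x := hl m (by simp)
      have hrest : ∀ m' ∈ rest, m' ≠ x := fun m' hm' => hl m' (by simp [hm'])
      by_cases hs : m ∈ s
      · have h1 : PySem.Set.add (x :: s) m = x :: s :=
          PySem.Set.add_of_mem (by simp [hs])
        have h2 : PySem.Set.add s m = s := PySem.Set.add_of_mem hs
        simp only [List.foldl_cons, h1, h2, ih s hrest]
      · have h1 : PySem.Set.add (x :: s) m = x :: (s ++ [m]) := by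
          have : PySem.Set.add (x :: s) m = (x :: s) ++ [m] :=
            PySem.Set.add_of_not_mem (by simp [hs, hmx])
          simpa using this
        have h2 : PySem.Set.add s m = s ++ [m] := PySem.Set.add_of_not_mem hs
        simp only [List.foldl_cons, h1, h2, ih (s ++ [m]) hrest]

-- first-occurrence dedup, selection form
lemma dedup_cons (x : String) (rest : List String) :
    PySem.List.dedup (x :: rest) = x :: PySem.List.dedup (rest.filter (fun m => !(m == x))) := by
  unfold PySem.List.dedup PySem.Set.ofList
  rw [List.foldl_cons]
  have h0 : PySem.Set.add PySem.Set.empty x = [x] := by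
    simp [PySem.Set.add, PySem.Set.empty, PySem.Set.contains]
  rw [h0, foldl_add_filter x rest [x] (by simp)]
  exact foldl_add_cons_out x _ []
    (by intro m hm; have := List.of_mem_filter hm; simpa using this)

-- dedup lists names in strictly increasing order of first index
lemma dedup_filter_pairwise_idxOf :
    ∀ (xs : List String) (p : String → Bool),
      (PySem.List.dedup (xs.filter p)).Pairwise (fun a b => xs.idxOf a < xs.idxOf b) := by
  intro xs
  induction xs with
  | nil => intro p; simp [PySem.List.dedup, PySem.Set.ofList, PySem.Set.empty]
  | cons x rest ih =>
      intro p
      by_cases hp : p x = true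
      · rw [List.filter_cons_of_pos hp, dedup_cons, List.filter_filter]
        have key : ∀ m ∈ PySem.List.dedup (rest.filter (fun m => !(m == x) && p m)),
            m ∈ rest ∧ m ≠ x := by
          intro m hm
          have hm' : m ∈ rest.filter (fun m => !(m == x) && p m) := by
            simpa [PySem.List.mem_dedup] using hm
          have h1 := List.mem_of_mem_filter hm'
          have h2 := List.of_mem_filter hm'
          simp only [Bool.and_eq_true, bne_iff_ne, Bool.not_eq_true'] at h2
          exact ⟨h1, by simpa using h2.1⟩
        constructor
        · intro b hb
          have hb' := key b hb
          rw [List.idxOf_cons_self, List.idxOf_cons_ne _ (by simpa using Ne.symm hb'.2)]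
          omega
        · have := ih (fun m => !(m == x) && p m)
          refine this.imp_of_mem ?_
          intro a b ha hb hab
          have ha' := key a ha
          have hb' := key b hb
          rw [List.idxOf_cons_ne _ (by simpa using Ne.symm ha'.2),
              List.idxOf_cons_ne _ (by simpa using Ne.symm hb'.2)]
          omega
      · rw [List.filter_cons_of_neg (by simpa using hp)]
        have key : ∀ m ∈ PySem.List.dedup (rest.filter p), m ≠ x := by
          intro m hm
          have hm' : m ∈ rest.filter p := by simpa [PySem.List.mem_dedup] using hm
          have h2 := List.of_mem_filter hm'
          intro he; subst he; exact hp h2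
        have := ih p
        refine this.imp_of_mem ?_
        intro a b ha hb hab
        rw [List.idxOf_cons_ne _ (by simpa using Ne.symm (key a ha)),
            List.idxOf_cons_ne _ (by simpa using Ne.symm (key b hb))]
        omega

lemma dedup_pairwise_idxOf (xs : List String) :
    (PySem.List.dedup xs).Pairwise (fun a b => xs.idxOf a < xs.idxOf b) := by
  have := dedup_filter_pairwise_idxOf xs (fun _ => true)
  simpa using this

-- the sort step recovers the first-appearance order
lemma sorted_keys_eq_dedup (names : List String) :
    PySem.List.sorted (firstD names 0).keys (fun n => (firstD names 0).getD n 0) false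
      = PySem.List.dedup names := by
  apply PySem.List.sorted_eq_of_perm_of_pairwise_lt
  · apply (List.perm_ext_iff_of_nodup (PySem.List.nodup_dedup names) (firstD_nodup_keys names 0)).2
    intro n
    rw [PySem.List.mem_dedup, firstD_mem_keys]
  · have hpw := dedup_pairwise_idxOf names
    refine hpw.imp_of_mem ?_
    intro a b ha hb hab
    have ha' : a ∈ names := (PySem.List.mem_dedup names a).1 ha
    have hb' : b ∈ names := (PySem.List.mem_dedup names b).1 hb
    rw [firstD_getD names a ha', firstD_getD names b hb']
    exact_mod_cast hab

-- building the result dict over the (nodup) ordered unique names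
lemma build_items (colors : List String) :
    ∀ (u pre : List String) (d : PySem.Dict String String),
      d.items = colorTbl colors pre →
      (∀ n ∈ u, n ∉ pre) → u.Nodup →
      ((PySem.List.enumerate u (pre.length : Int)).foldl
          (fun d p => d.insert p.2 (PySem.List.pyGetD colors p.1 "")) d).items
        = colorTbl colors (pre ++ u) := by
  intro u
  induction u with
  | nil => intro pre d h _ _; simpa [PySem.List.enumerate_nil] using h
  | cons n tail ih =>
      intro pre d h hfresh hnd
      rw [PySem.List.enumerate_cons, List.foldl_cons]
      have hcont : d.contains n = false := by
        have hk := keys_of_items_tbl colors pre d h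
        have : ¬ d.contains n = true := by
          rw [PySem.Dict.contains_iff_mem_keys, hk]
          exact hfresh n (by simp)
        simpa using this
      have hitems : (d.insert n (PySem.List.pyGetD colors (pre.length : Int) "")).items
          = colorTbl colors (pre ++ [n]) := by
        rw [PySem.Dict.items_insert_of_not_contains _ _ hcont, h, colorTbl_append_singleton]
      have hfresh' : ∀ m ∈ tail, m ∉ pre ++ [n] := by
        intro m hm
        have h1 : m ∉ pre := hfresh m (by simp [hm])
        have h2 : m ≠ n := by
          intro he; subst he; exact (List.nodup_cons.1 hnd).1 hm
        simp [h1, h2]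
      have hlen : ((pre.length : Int) + 1) = ((pre ++ [n]).length : Int) := by simp
      rw [hlen, ih (pre ++ [n]) _ hitems hfresh' (List.nodup_cons.1 hnd).2,
          List.append_assoc]
      rfl

-- ===== VERDICT (by name: the statement is the Claim_ definition above) =====
theorem assign_colors_spec : Claim_equal_assign_colors := by
  intro names avail _ _
  unfold Spec_assign_colors assign_colors assign_colors_alt
  have h0 : (PySem.Dict.empty : PySem.Dict String String).items = colorTbl avail [] := by
    simp [colorTbl, PySem.List.enumerate_nil, PySem.Dict.empty]
  have hA := loop_eq avail names [] PySem.Dict.empty h0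
  simp only [List.length_nil, Int.natCast_zero] at hA
  have hB := build_items avail (PySem.List.dedup names) [] PySem.Dict.empty h0
      (by simp) (PySem.List.nodup_dedup names)
  simp only [List.length_nil, Int.natCast_zero, List.nil_append] at hB
  show (List.foldl (assignStep avail) (0, PySem.Dict.empty, ([] : PySem.Set String)) names).2.1.items = _
  rw [hA, PySem.Set.update_nil_left]
  show colorTbl avail (PySem.List.dedup names)
      = ((PySem.List.enumerate (PySem.List.sorted (firstD names 0).keys
            (fun n => (firstD names 0).getD n 0) false) 0).foldl
          (fun d p => d.insert p.2 (PySem.List.pyGetD avail p.1 "")) PySem.Dict.empty).items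
  rw [sorted_keys_eq_dedup names, ← hB]
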